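-- pv_equiv track=rewrite | github.com/ACW101/JPEG-compression | compress.py | to_run_len
-- ===== SOURCE A (Python) =====
-- def to_run_len(ac):
--     run_len = []
--     zeros = 0
--     i = 0
--     while i < len(ac):
--         if ac[i] == 0:
--             zeros += 1
--             if zeros == 16:
--                 run_len.append((15, 0))
--                 zeros = 0
--         else:
--             run_len.append((zeros, ac[i]))
--             zeros = 0
--         i += 1
--     return run_len
-- ===== SOURCE B (Python) =====
-- def to_run_len(ac):
--     nz = [(i, v) for i, v in enumerate(ac) if v != 0]
--     out = []
--     prev = 0
--     for i, v in nz: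
--         q, r = divmod(i - prev, 16)
--         out += [(15, 0)] * q
--         out.append((r, v))
--         prev = i + 1
--     out += [(15, 0)] * ((len(ac) - prev) // 16)
--     return out
-- ===== Notes on version B (the rewrite author's own statement) =====
-- stated objective: alternative
-- what changed: Replaces the incremental zero-counter with reset-at-16 by a two-phase gap computation: first collect the nonzero positions via enumerate, then emit each run with divmod gap arithmetic and handle trailing zeros by integer division.
import Mathlib
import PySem

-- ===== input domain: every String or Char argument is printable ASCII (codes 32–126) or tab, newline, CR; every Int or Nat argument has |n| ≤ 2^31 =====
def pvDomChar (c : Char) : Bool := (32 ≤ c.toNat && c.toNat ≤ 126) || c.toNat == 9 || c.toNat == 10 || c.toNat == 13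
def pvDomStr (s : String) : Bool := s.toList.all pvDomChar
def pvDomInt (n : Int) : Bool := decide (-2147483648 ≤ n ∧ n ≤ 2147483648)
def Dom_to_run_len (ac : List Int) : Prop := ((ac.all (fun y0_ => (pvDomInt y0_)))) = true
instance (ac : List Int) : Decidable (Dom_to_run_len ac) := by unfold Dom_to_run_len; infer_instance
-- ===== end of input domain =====

-- B replaces A's incremental zero-counter (reset at 16) by a two-phase gap computation:
-- collect nonzero positions, then emit runs by divmod gap arithmetic (objective: alternative).


-- ===== PORT A =====
-- while loop over ac with state (run_len, zeros)
def to_run_len (ac : List Int) : List (Int × Int) :=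
  (ac.foldl (fun (st : List (Int × Int) × Int) x =>
      if x = 0 then
        if st.2 + 1 = 16 then (st.1 ++ [(15, 0)], 0) else (st.1, st.2 + 1)
      else (st.1 ++ [(st.2, x)], 0)) ([], 0)).1

-- ===== PORT B =====
-- nz = nonzero (index, value) pairs; then gap arithmetic with divmod; trailing zeros by //16
def to_run_len_alt (ac : List Int) : List (Int × Int) :=
  let nz := (PySem.List.enumerate ac 0).filter (fun p => p.2 != 0)
  let st := nz.foldl (fun (st : List (Int × Int) × Int) p =>
      let q := PySem.Int.floordiv (p.1 - st.2) 16
      let r := PySem.Int.mod (p.1 - st.2) 16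
      (st.1 ++ PySem.List.pyRepeat [((15 : Int), (0 : Int))] q ++ [(r, p.2)], p.1 + 1)) ([], 0)
  st.1 ++ PySem.List.pyRepeat [((15 : Int), (0 : Int))]
    (PySem.Int.floordiv (PySem.List.len ac - st.2) 16)

-- ===== PRECONDITION & SPEC =====
def Spec_to_run_len (ac : List Int) (out : List (Int × Int)) : Prop := out = to_run_len_alt ac
instance (ac : List Int) (out : List (Int × Int)) : Decidable (Spec_to_run_len ac out) := by unfold Spec_to_run_len; infer_instance

-- ===== CLAIM (what is proved, stated in full; the proofs are below) =====
def Claim_equal_to_run_len : Prop := ∀ (ac : List Int), Dom_to_run_len ac → Spec_to_run_len ac (to_run_len ac)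

-- ===== LEMMAS AND PROOFS =====

-- canonical recursion: result of run-length encoding xs with g pending zeros
def rleR : List Int → Nat → List (Int × Int)
  | [], g => List.replicate (g / 16) ((15 : Int), (0 : Int))
  | x :: xs, g =>
      if x = 0 then rleR xs (g + 1)
      else List.replicate (g / 16) ((15 : Int), (0 : Int)) ++ (((g % 16 : Nat) : Int), x) :: rleR xs 0

theorem rleR_add16 (xs : List Int) (g : Nat) : rleR xs (g + 16) = (15, 0) :: rleR xs g := by
  induction xs generalizing g with
  | nil =>
      simp [rleR, Nat.add_div_right, List.replicate_succ]
  | cons x xs ih =>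
      by_cases hx : x = 0
      · simpa [rleR, hx, Nat.add_right_comm g 16 1] using ih (g + 1)
      · simp [rleR, hx, Nat.add_div_right, Nat.add_mod_right, List.replicate_succ]

theorem to_run_len_loop (xs : List Int) (acc : List (Int × Int)) (z : Int)
    (h0 : 0 ≤ z) (h16 : z < 16) :
    (xs.foldl (fun (st : List (Int × Int) × Int) x =>
      if x = 0 then
        if st.2 + 1 = 16 then (st.1 ++ [(15, 0)], 0) else (st.1, st.2 + 1)
      else (st.1 ++ [(st.2, x)], 0)) (acc, z)).1 = acc ++ rleR xs z.toNat := by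
  induction xs generalizing acc z with
  | nil =>
      have h : z.toNat / 16 = 0 := by omega
      simp [rleR, h]
  | cons x xs ih =>
      rw [List.foldl_cons]
      by_cases hx : x = 0
      · by_cases hz : z + 1 = 16
        · have htn : z.toNat + 1 = 16 := by omega
          simp only [hx, hz, reduceIte]
          rw [ih (acc ++ [(15, 0)]) 0 (by omega) (by omega)]
          have h16' : rleR xs (z.toNat + 1) = (15, 0) :: rleR xs 0 := by
            rw [htn]; simpa using rleR_add16 xs 0
          simp [rleR, h16']
        · simp only [hx, reduceIte, if_neg hz]
          rw [ih acc (z + 1) (by omega) (by omega)]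
          have hc : (z + 1).toNat = z.toNat + 1 := by omega
          simp [rleR, hx, hc]
      · simp only [if_neg hx]
        rw [ih (acc ++ [(z, x)]) 0 (by omega) (by omega)]
        have h1 : z.toNat / 16 = 0 := by omega
        have h2 : ((z.toNat % 16 : Nat) : Int) = z := by omega
        simp [rleR, hx, h1, h2]

theorem to_run_len_alt_loop (xs : List Int) (s g : Int) (acc : List (Int × Int))
    (hg : 0 ≤ g) :
    (let st := ((PySem.List.enumerate xs s).filter (fun p => p.2 != 0)).foldl
      (fun (st : List (Int × Int) × Int) p =>
        let q := PySem.Int.floordiv (p.1 - st.2) 16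
        let r := PySem.Int.mod (p.1 - st.2) 16
        (st.1 ++ PySem.List.pyRepeat [((15 : Int), (0 : Int))] q ++ [(r, p.2)], p.1 + 1)) (acc, s - g)
     st.1 ++ PySem.List.pyRepeat [((15 : Int), (0 : Int))]
       (PySem.Int.floordiv ((s + xs.length) - st.2) 16)) = acc ++ rleR xs g.toNat := by
  induction xs generalizing s g acc with
  | nil =>
      have hq : PySem.Int.floordiv ((g.toNat : Nat) : Int) 16 = ((g.toNat / 16 : Nat) : Int) := by
        exact_mod_cast PySem.Int.floordiv_natCast g.toNat 16
      have hg' : s + (([] : List Int).length : Int) - (s - g) = ((g.toNat : Nat) : Int) := by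
        simp; omega
      simp only [PySem.List.enumerate_nil, List.filter_nil, List.foldl_nil, hg', hq]
      simp [rleR, PySem.List.pyRepeat_singleton]
      omega
  | cons x xs ih =>
      rw [PySem.List.enumerate_cons]
      by_cases hx : x = 0
      · have hfil : ((s, x) :: PySem.List.enumerate xs (s + 1)).filter (fun p => p.2 != 0)
            = (PySem.List.enumerate xs (s + 1)).filter (fun p => p.2 != 0) := by
          simp [hx]
        rw [hfil]
        have hprev : s - g = (s + 1) - (g + 1) := by ring
        rw [hprev]
        have hIH := ih (s + 1) (g + 1) acc (by omega)
        have hlen : s + (((x :: xs).length : Nat) : Int) = (s + 1) + ((xs.length : Nat) : Int) := by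
          simp; ring
        simp only [hlen]
        rw [hIH]
        have hc : (g + 1).toNat = g.toNat + 1 := by omega
        simp [rleR, hx, hc]
      · have hfil : ((s, x) :: PySem.List.enumerate xs (s + 1)).filter (fun p => p.2 != 0)
            = (s, x) :: (PySem.List.enumerate xs (s + 1)).filter (fun p => p.2 != 0) := by
          simp [hx]
        rw [hfil, List.foldl_cons]
        have hsub : s - (s - g) = ((g.toNat : Nat) : Int) := by omega
        have hq : PySem.Int.floordiv ((g.toNat : Nat) : Int) 16 = ((g.toNat / 16 : Nat) : Int) := by
          exact_mod_cast PySem.Int.floordiv_natCast g.toNat 16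
        have hr : PySem.Int.mod ((g.toNat : Nat) : Int) 16 = ((g.toNat % 16 : Nat) : Int) := by
          exact_mod_cast PySem.Int.mod_natCast g.toNat 16
        simp only [hsub, hq, hr]
        have hacc := ih (s + 1) 0
          (acc ++ PySem.List.pyRepeat [((15 : Int), (0 : Int))] ((g.toNat / 16 : Nat) : Int)
            ++ [(((g.toNat % 16 : Nat) : Int), x)]) (le_refl 0)
        have hprev : (s + 1 : Int) - 0 = s + 1 := by ring
        have hlen : s + (((x :: xs).length : Nat) : Int) = (s + 1) + ((xs.length : Nat) : Int) := by
          simp; ring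
        simp only [hlen, hprev, Int.toNat_zero] at hacc ⊢
        rw [hacc]
        simp [rleR, hx, PySem.List.pyRepeat_singleton]
        omega

-- ===== VERDICT (by name: the statement is the Claim_ definition above) =====
theorem to_run_len_spec : Claim_equal_to_run_len := by
  intro ac _
  unfold Spec_to_run_len to_run_len to_run_len_alt
  rw [to_run_len_loop ac [] 0 (by omega) (by omega)]
  have h := to_run_len_alt_loop ac 0 0 [] (le_refl 0)
  simp only [Int.toNat_zero, sub_zero, zero_add, List.nil_append] at h ⊢
  rw [← h]
  simp [PySem.List.len_eq]
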